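-- pv_equiv track=rewrite | github.com/tlylt/Hash-Code-Notawake | getPizza.py | stupidWay
-- ===== SOURCE A (Python) =====
-- def stupidWay(target,pizzas):
--     '''
--     params
--     - target: (int) number of slices required
--     - pizzas: (list) list of different pizzas represented by the number of slices each has
--     output:
--     - sum_so_far: (int) a number of slices smaller or equal to the target, not maximum possible slices
--     - records: (list) list of indexs of the pizzas taken
--     logic:
--     - add slices from the smallest pizza until the sum exceeds the target
--     '''
--     records = []
--     sum_so_far = 0
--     for idx,val in enumerate(pizzas):
--         if val+sum_so_far>target:
--             break
--         records.append(idx)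
--         sum_so_far+=val
--
--     return (sum_so_far, records)
-- ===== SOURCE B (Python) =====
-- def stupidWay(target, pizzas):
--     # build the full prefix-sum table, then find the first index whose
--     # prefix exceeds the target; records is just range(i)
--     prefix = []
--     s = 0
--     for v in pizzas:
--         s += v
--         prefix.append(s)
--     i = next((k for k, p in enumerate(prefix) if p > target), len(prefix))
--     return (prefix[i - 1] if i > 0 else 0, list(range(i)))
-- ===== Notes on version B (the rewrite author's own statement) =====
-- stated objective: alternative
-- what changed: Replaces the fused accumulate-and-break loop by a two-phase structure: build the whole prefix-sum table first, then locate the first prefix strictly greater than target and read the answer off the table (sum = prefix[i-1], records = range(i)).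
import Mathlib
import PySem

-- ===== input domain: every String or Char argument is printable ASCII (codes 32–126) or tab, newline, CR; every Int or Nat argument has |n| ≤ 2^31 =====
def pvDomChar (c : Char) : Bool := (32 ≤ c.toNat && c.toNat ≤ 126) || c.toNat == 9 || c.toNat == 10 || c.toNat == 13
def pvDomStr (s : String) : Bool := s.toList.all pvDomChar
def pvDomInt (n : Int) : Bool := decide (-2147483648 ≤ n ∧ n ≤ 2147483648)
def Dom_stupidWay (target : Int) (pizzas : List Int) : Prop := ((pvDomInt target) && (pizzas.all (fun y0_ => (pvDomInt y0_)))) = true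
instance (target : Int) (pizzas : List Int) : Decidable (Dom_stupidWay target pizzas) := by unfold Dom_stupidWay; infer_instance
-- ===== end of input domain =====

-- B builds the full prefix-sum table first, then finds the first prefix exceeding the target (alternative decomposition, same cost).


-- ===== PORT A =====
-- the for-loop over enumerate(pizzas) with break, carrying (idx, sum_so_far, records)
def stupidWayGoA (target : Int) : List Int → Int → Int → List Int → Int × List Int
  | [], _, sum_so_far, records => (sum_so_far, records)
  | v :: rest, idx, sum_so_far, records =>
    if v + sum_so_far > target then (sum_so_far, records)
    else stupidWayGoA target rest (idx + 1) (sum_so_far + v) (records ++ [idx])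

def stupidWay (target : Int) (pizzas : List Int) : Int × List Int :=
  stupidWayGoA target pizzas 0 0 []

-- ===== PORT B =====
-- phase 1: the prefix-sum table (running sum s, appending s+v for each v)
def stupidWayPrefix : List Int → Int → List Int
  | [], _ => []
  | v :: rest, s => (s + v) :: stupidWayPrefix rest (s + v)

-- phase 2: next((k for k,p in enumerate(prefix) if p > target), len(prefix))
def stupidWayFind (target : Int) : List Int → Nat → Nat
  | [], k => k
  | p :: rest, k => if p > target then k else stupidWayFind target rest (k + 1)

def stupidWay_alt (target : Int) (pizzas : List Int) : Int × List Int :=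
  let pref := stupidWayPrefix pizzas 0
  let i := stupidWayFind target pref 0
  ((if 0 < i then (pref[i - 1]?).getD 0 else 0), PySem.List.pyRange 0 (i : Int) 1)

-- ===== PRECONDITION & SPEC =====
def Spec_stupidWay (target : Int) (pizzas : List Int) (out : Int × List Int) : Prop := out = stupidWay_alt target pizzas
instance (target : Int) (pizzas : List Int) (out : Int × List Int) : Decidable (Spec_stupidWay target pizzas out) := by unfold Spec_stupidWay; infer_instance

-- ===== CLAIM (what is proved, stated in full; the proofs are below) =====
def Claim_equal_stupidWay : Prop := ∀ (target : Int) (pizzas : List Int), Dom_stupidWay target pizzas → Spec_stupidWay target pizzas (stupidWay target pizzas)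

-- ===== LEMMAS AND PROOFS =====

lemma stupidWayFind_succ (t : Int) : ∀ (l : List Int) (n : Nat),
    stupidWayFind t l (n + 1) = stupidWayFind t l n + 1 := by
  intro l
  induction l with
  | nil => intro n; simp [stupidWayFind]
  | cons p rest ih =>
    intro n
    by_cases h : p > t <;> simp [stupidWayFind, h, ih]

lemma range_map_shift (idx : Int) (j : Nat) :
    (List.range (j + 1)).map (fun k : Nat => idx + (k : Int)) =
      idx :: (List.range j).map (fun k : Nat => (idx + 1) + (k : Int)) := by
  rw [List.range_succ_eq_map]
  simp only [List.map_cons, List.map_map, Nat.cast_zero, add_zero]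
  congr 1
  apply List.map_congr_left
  intro k _
  simp only [Function.comp]
  push_cast
  ring

lemma stupidWayGoA_key (t : Int) : ∀ (ps : List Int) (idx s : Int) (recs : List Int),
    stupidWayGoA t ps idx s recs =
      ((if 0 < stupidWayFind t (stupidWayPrefix ps s) 0 then
          ((stupidWayPrefix ps s)[stupidWayFind t (stupidWayPrefix ps s) 0 - 1]?).getD 0
        else s),
       recs ++ (List.range (stupidWayFind t (stupidWayPrefix ps s) 0)).map
         (fun k : Nat => idx + (k : Int))) := by
  intro ps
  induction ps with
  | nil => intro idx s recs; simp [stupidWayGoA, stupidWayPrefix, stupidWayFind]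
  | cons v rest ih =>
    intro idx s recs
    simp only [stupidWayGoA, stupidWayPrefix, stupidWayFind]
    by_cases h : v + s > t
    · have h' : s + v > t := by omega
      simp [h, h']
    · have h' : ¬ s + v > t := by omega
      simp only [h, h', if_false]
      rw [ih, stupidWayFind_succ]
      rw [range_map_shift]
      cases hj : stupidWayFind t (stupidWayPrefix rest (s + v)) 0 with
      | zero => simp
      | succ j' => simp

theorem stupidWay_spec_aux (t : Int) (ps : List Int) :
    stupidWay t ps = stupidWay_alt t ps := by
  unfold stupidWay stupidWay_alt
  rw [stupidWayGoA_key]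
  simp [PySem.List.pyRange_one]

-- ===== VERDICT (by name: the statement is the Claim_ definition above) =====
theorem stupidWay_spec : Claim_equal_stupidWay := by
  intro t ps _
  unfold Spec_stupidWay
  exact stupidWay_spec_aux t ps
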